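-- pv_equiv track=rewrite | github.com/AlphaBlack619/My_Python_File | home_coming/sep26.py | name_sorter
-- ===== SOURCE A (Python) =====
-- def name_sorter(name):
--     first_name = ''
--     last_name = ''
--     middle_name = ''
--     cont = 0
--     for x in range(len(name)):
--         if name[x] == ' ' and cont <= 0:
--             middle_name = name[x+1]
--             cont = 1
--         if name[x] == ' ' and cont == 1:
--             last_name = last_name + name[x]
--     return name[0] + '.' + middle_name + '.' + last_name
-- ===== SOURCE B (Python) =====
-- def name_sorter(name):
--     middle_name = ''
--     if ' ' in name:
--         middle_name = name[name.index(' ') + 1]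
--     return name[0] + '.' + middle_name + '.' + ' ' * name.count(' ')
-- ===== Notes on version B (the rewrite author's own statement) =====
-- stated objective: simpler
-- what changed: Replaces A's stateful index loop (cont flag, char-by-char accumulation of middle_name/last_name) by direct closed-form expressions: middle_name is the character after the first space found via index(), and last_name is ' ' repeated count(' ') times; the C-level builtins make it measurably faster too.
-- outside the precondition, e.g. on name_sorter(' '): A raises IndexError, B raises IndexError
import Mathlib
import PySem

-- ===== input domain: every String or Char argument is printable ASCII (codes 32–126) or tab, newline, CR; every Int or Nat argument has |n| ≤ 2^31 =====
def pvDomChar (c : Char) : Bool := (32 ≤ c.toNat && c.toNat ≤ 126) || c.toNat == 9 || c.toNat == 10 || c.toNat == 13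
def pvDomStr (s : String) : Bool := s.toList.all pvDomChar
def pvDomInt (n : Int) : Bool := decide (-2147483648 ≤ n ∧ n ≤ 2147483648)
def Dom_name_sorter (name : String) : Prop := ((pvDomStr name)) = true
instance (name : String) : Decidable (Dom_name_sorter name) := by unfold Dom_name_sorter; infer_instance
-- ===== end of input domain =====

-- B replaces A's stateful index loop (flags cont/middle/last) by direct formulas:
-- middle = char after the first space (via index), last = ' ' * count of spaces; objective: simpler.

-- ===== PORT A =====
-- the loop body: two sequential 'if's over state (middle_name, last_name, cont)
def nsStep (l : List Char) (st : List Char × List Char × Int) (x : Int) :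
    List Char × List Char × Int :=
  let mc : List Char × Int :=
    if PySem.List.pyGetD l x ' ' = ' ' ∧ st.2.2 ≤ 0 then
      ([PySem.List.pyGetD l (x + 1) ' '], 1)
    else (st.1, st.2.2)
  let la : List Char :=
    if PySem.List.pyGetD l x ' ' = ' ' ∧ mc.2 = 1 then
      st.2.1 ++ [PySem.List.pyGetD l x ' ']
    else st.2.1
  (mc.1, la, mc.2)

def name_sorter (name : String) : String :=
  let l := name.toList
  let st := (PySem.List.pyRange 0 (l.length : Int) 1).foldl (nsStep l) ([], [], 0)
  String.mk (PySem.List.pyGetD l 0 ' ' :: '.' :: st.1 ++ '.' :: st.2.1)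

-- ===== PORT B =====
def name_sorter_alt (name : String) : String :=
  let l := name.toList
  let middle : List Char :=
    if PySem.Chars.isIn [' '] l then
      [PySem.List.pyGetD l (PySem.Chars.find l [' '] + 1) ' ']
    else []
  String.mk (PySem.List.pyGetD l 0 ' ' :: '.' :: middle ++
    '.' :: List.replicate (PySem.Chars.count l [' ']) ' ')

-- ===== PRECONDITION & SPEC =====
-- Pre_ excludes exactly the inputs where Python A raises IndexError: the empty string
-- (name[0]) and strings whose FIRST space is the last character (name[x+1]); B raises there too.
def Pre_name_sorter (name : String) : Prop :=
  name.toList ≠ [] ∧ ¬ (name.toList.getLast? = some ' ' ∧ ' ' ∉ name.toList.dropLast)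
instance (name : String) : Decidable (Pre_name_sorter name) := by
  unfold Pre_name_sorter; infer_instance
def pvWitness_name_sorter : String := "John A Doe"
def Spec_name_sorter (name : String) (out : String) : Prop := out = name_sorter_alt name
instance (name : String) (out : String) : Decidable (Spec_name_sorter name out) := by
  unfold Spec_name_sorter; infer_instance

-- ===== CLAIM (what is proved, stated in full; the proofs are below) =====
def Claim_equal_name_sorter : Prop := ∀ (name : String), Dom_name_sorter name →
  Pre_name_sorter name → Spec_name_sorter name (name_sorter name)

-- ===== LEMMAS AND PROOFS =====

-- characterisation of A's loop after k iterations
lemma nsLoop_spec (l : List Char) (k : Nat) (hk : k ≤ l.length) :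
    ((List.range k).map (Int.ofNat)).foldl (nsStep l) ([], [], 0) =
      (if ' ' ∈ l.take k then [l.getD (l.idxOf ' ' + 1) ' '] else [],
       List.replicate ((l.take k).count ' ') ' ',
       if ' ' ∈ l.take k then 1 else 0) := by
  induction k with
  | zero => simp
  | succ k ih =>
    have hk' : k ≤ l.length := Nat.le_of_succ_le hk
    have hkl : k < l.length := hk
    rw [List.range_succ, List.map_append, List.foldl_append, ih hk']
    have htake : l.take (k+1) = l.take k ++ [l[k]] := (List.take_append_getElem hkl).symm
    have hg : l[k]? = some l[k] := List.getElem?_eq_getElem hkl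
    have hg1 : PySem.List.pyGetD l ((k : Int) + 1) ' ' = l[k+1]?.getD ' ' := by
      rw [show ((k : Int) + 1) = ((k + 1 : Nat) : Int) by push_cast; ring,
        PySem.List.pyGetD_natCast]
      simp [List.getD]
    have hcount : (l.take (k+1)).count ' ' =
        (l.take k).count ' ' + (if l[k] = ' ' then 1 else 0) := by
      rw [htake, List.count_append]
      by_cases hsp : l[k] = ' ' <;> simp [hsp]
    by_cases hmem : ' ' ∈ l.take k
    · rw [if_pos hmem, if_pos hmem]
      have hmem1 : ' ' ∈ l.take (k+1) := htake ▸ List.mem_append_left _ hmem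
      rw [if_pos hmem1, if_pos hmem1]
      by_cases hsp : l[k] = ' '
      · simp [nsStep, hg, hcount, hsp, List.replicate_succ']
      · simp [nsStep, hg, hcount, hsp]
    · rw [if_neg hmem, if_neg hmem]
      by_cases hsp : l[k] = ' '
      · have hsplit : l = l.take k ++ l[k] :: l.drop (k+1) := by
          conv_lhs => rw [← List.take_append_drop k l]
          rw [List.drop_eq_getElem_cons hkl]
        have hidx : l.idxOf ' ' = k := by
          conv_lhs => rw [hsplit]
          rw [List.idxOf_append]
          simp [hmem, hsp, List.length_take, Nat.min_eq_left hk']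
        have hmem1 : ' ' ∈ l.take (k+1) := by
          rw [htake, hsp]; exact List.mem_append_right _ (by simp)
        rw [if_pos hmem1, if_pos hmem1]
        simp [nsStep, hg, hcount, hg1, hidx, hsp, List.replicate_succ', List.getD]
      · have hmem1 : ' ' ∉ l.take (k+1) := by
          rw [htake]
          intro h
          rcases List.mem_append.1 h with h' | h'
          · exact hmem h'
          · exact hsp (List.mem_singleton.1 h').symm
        rw [if_neg hmem1, if_neg hmem1]
        simp [nsStep, hg, hcount, hsp]

lemma count_go_singleton (c : Char) (l : List Char) (fuel acc : Nat)
    (h : l.length ≤ fuel) :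
    PySem.Chars.count.go [c] fuel l acc = acc + l.count c := by
  induction l generalizing fuel acc with
  | nil => cases fuel <;> simp [PySem.Chars.count.go]
  | cons x xs ih =>
    cases fuel with
    | zero => simp at h
    | succ f =>
      have hf : xs.length ≤ f := Nat.le_of_succ_le_succ h
      by_cases hx : x = c
      · simp [PySem.Chars.count.go, hx, List.isPrefixOf, ih f (acc+1) hf,
          List.count_cons]
        omega
      · have : [c].isPrefixOf (x :: xs) = false := by
          simp [List.isPrefixOf, hx]; exact fun h' => hx h'.symm
        simp [PySem.Chars.count.go, this, ih f acc hf, List.count_cons, hx]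

lemma count_singleton (c : Char) (l : List Char) :
    PySem.Chars.count l [c] = l.count c := by
  simpa using count_go_singleton c l l.length 0 le_rfl

lemma find_go_singleton (c : Char) (l : List Char) (k : Nat) :
    PySem.Chars.find.go [c] l k =
      if c ∈ l then ((k + l.idxOf c : Nat) : Int) else -1 := by
  induction l generalizing k with
  | nil => simp [PySem.Chars.find.go]
  | cons x xs ih =>
    by_cases hx : x = c
    · simp [PySem.Chars.find.go, List.isPrefixOf, hx]
    · have hpre : [c].isPrefixOf (x :: xs) = false := by
        simp [List.isPrefixOf, hx]; exact fun h' => hx h'.symm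
      by_cases hm : c ∈ xs
      · have : c ∈ x :: xs := List.mem_cons_of_mem _ hm
        simp [PySem.Chars.find.go, hpre, ih, hm, this, List.idxOf_cons,
          hx]
        push_cast; ring
      · have : c ∉ x :: xs := by simp [hm, Ne.symm hx, hx]
        simp [PySem.Chars.find.go, hpre, ih, hm, this]

lemma find_singleton (c : Char) (l : List Char) :
    PySem.Chars.find l [c] = if c ∈ l then (l.idxOf c : Int) else -1 := by
  have := find_go_singleton c l 0
  simpa [PySem.Chars.find] using this

lemma isIn_singleton (c : Char) (l : List Char) :
    PySem.Chars.isIn [c] l = true ↔ c ∈ l := by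
  rw [PySem.Chars.isIn_iff_infix]
  constructor
  · intro ⟨p, s, h⟩
    exact h ▸ (by simp)
  · intro h
    obtain ⟨p, s, rfl⟩ := List.append_of_mem h
    exact ⟨p, s, by simp⟩

-- ===== VERDICT (by name: the statement is the Claim_ definition above) =====
theorem name_sorter_spec : Claim_equal_name_sorter := by
  intro name _ _
  unfold Spec_name_sorter name_sorter name_sorter_alt
  set l := name.toList with hl
  have hrange : PySem.List.pyRange 0 (l.length : Int) 1 =
      (List.range l.length).map (Int.ofNat) := by
    simpa using PySem.List.pyRange_zero_natCast (n := l.length)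
  simp only [hrange, nsLoop_spec l l.length le_rfl, count_singleton, find_singleton]
  by_cases hmem : ' ' ∈ l
  · have hf : PySem.Chars.isIn [' '] l = true := (isIn_singleton ' ' l).2 hmem
    have : PySem.List.pyGetD l ((l.idxOf ' ' : Int) + 1) ' ' = l.getD (l.idxOf ' ' + 1) ' ' := by
      have h1 : ((l.idxOf ' ' : Int) + 1) = ((l.idxOf ' ' + 1 : Nat) : Int) := by push_cast; ring
      rw [h1, PySem.List.pyGetD_natCast]
    simp [hmem, hf, this]
  · have hf : PySem.Chars.isIn [' '] l ≠ true := fun h => hmem ((isIn_singleton ' ' l).1 h)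
    simp [hmem, hf]
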